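-- pv_equiv track=rewrite | github.com/namehash/namekit | apps/api.nameai.io/nameai/nlp_inspector.py | top_tokenization
-- ===== SOURCE A (Python) =====
-- from typing import Optional
--
-- def top_tokenization(tokenizations) -> Optional[list[str]]:
--     # top_toks is a list of tokenizations with the same token count
--     top_toks = []
--     for tok in tokenizations:
--         if any(t == '' for t in tok['tokens']):
--             # ignore tokenizations with gaps
--             continue
--
--         if len(top_toks) == 0:
--             # first tokenization found
--             top_toks.append(tok)
--             continue
--
--         if len(tok['tokens']) <= len(top_toks[0]['tokens']):
--             if len(tok['tokens']) < len(top_toks[0]['tokens']):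
--                 # found new top tokenization, clear top_toks
--                 top_toks = []
--             # else: it's a tie, add to top_toks
--             top_toks.append(tok)
--
--     if len(top_toks) == 0:
--         # no valid tokenization found
--         return None
--
--     # choose the one with the highest probability
--     # (it's already sorted by prob)
--     top_tok = top_toks[0]
--
--     return [t for t in top_tok['tokens']]
-- ===== SOURCE B (Python) =====
-- def top_tokenization(tokenizations):
--     # index the FIRST gap-free tokenization of each token count; pick the minimal count
--     first_by_len = {}
--     for tok in tokenizations:
--         if '' in tok['tokens']:
--             continue
--         n = len(tok['tokens'])
--         if n not in first_by_len:
--             first_by_len[n] = tok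
--     if len(first_by_len) == 0:
--         return None
--     return list(first_by_len[min(first_by_len)]['tokens'])
-- ===== Notes on version B (the rewrite author's own statement) =====
-- stated objective: alternative
-- what changed: Replaces A's accumulate-and-reset tie-list loop with a dict indexing the first gap-free tokenization per token count, then selecting the entry at the minimal key.
-- outside the precondition, e.g. on top_tokenization([{'x': ['a']}]): A raises KeyError, B raises KeyError
import Mathlib
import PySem

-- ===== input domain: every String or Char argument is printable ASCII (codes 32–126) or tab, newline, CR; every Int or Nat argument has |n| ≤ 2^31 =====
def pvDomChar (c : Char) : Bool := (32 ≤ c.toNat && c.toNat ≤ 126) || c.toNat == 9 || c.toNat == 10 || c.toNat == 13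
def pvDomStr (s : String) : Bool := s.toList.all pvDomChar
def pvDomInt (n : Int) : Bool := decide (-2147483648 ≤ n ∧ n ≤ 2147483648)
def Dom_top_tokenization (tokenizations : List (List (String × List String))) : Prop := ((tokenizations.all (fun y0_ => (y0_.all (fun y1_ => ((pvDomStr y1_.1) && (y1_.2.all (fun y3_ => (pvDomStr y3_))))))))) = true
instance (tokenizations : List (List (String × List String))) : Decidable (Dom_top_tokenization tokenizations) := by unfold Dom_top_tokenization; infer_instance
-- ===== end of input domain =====

-- B replaces A's accumulate-and-reset tie-list loop with a dict indexing the first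
-- gap-free tokenization per token count, then selecting the entry at the minimal key.

-- tok['tokens']: first-match association-list lookup (exact Python dict semantics; the
-- missing-key case, where Python raises KeyError, is excluded by Pre_ below).
def pvTokens (tok : List (String × List String)) : List String :=
  ((tok.find? (fun p => p.1 == "tokens")).map (fun p => p.2)).getD []

-- ===== PORT A =====
-- one iteration of A's for-loop over top_toks
def pvAStep (top_toks : List (List (String × List String))) (tok : List (String × List String)) :
    List (List (String × List String)) :=
  if (pvTokens tok).any (fun t => t == "") then top_toks
  else if top_toks.length = 0 then top_toks ++ [tok]
  else if (pvTokens tok).length ≤ (pvTokens (top_toks.headD [])).length then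
    (if (pvTokens tok).length < (pvTokens (top_toks.headD [])).length then ([] : List (List (String × List String))) else top_toks) ++ [tok]
  else top_toks

def top_tokenization (tokenizations : List (List (String × List String))) : Option (List String) :=
  match tokenizations.foldl pvAStep [] with
  | [] => none
  | top_tok :: _ => some ((pvTokens top_tok).map (fun t => t))

-- ===== PORT B =====
-- one iteration of B's for-loop over first_by_len
def pvBStep (d : PySem.Dict Int (List (String × List String))) (tok : List (String × List String)) :
    PySem.Dict Int (List (String × List String)) :=
  if (pvTokens tok).contains "" then d
  else if d.contains ((pvTokens tok).length : Int) then d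
  else d.insert ((pvTokens tok).length : Int) tok

def top_tokenization_alt (tokenizations : List (List (String × List String))) : Option (List String) :=
  let d := tokenizations.foldl pvBStep PySem.Dict.empty
  if d.size = 0 then none
  else
    match PySem.List.min? d.keys (fun k => k) with
    | none => none
    | some m =>
      match d.get? m with
      | none => none
      | some best => some ((pvTokens best).map (fun t => t))

-- ===== PRECONDITION & SPEC =====
-- Pre_ excludes exactly the inputs where some tokenization lacks the "tokens" key,
-- on which both A and B raise KeyError.
def Pre_top_tokenization (tokenizations : List (List (String × List String))) : Prop :=
  (tokenizations.all (fun tok => tok.any (fun p => p.1 == "tokens"))) = true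
instance (tokenizations : List (List (String × List String))) : Decidable (Pre_top_tokenization tokenizations) := by unfold Pre_top_tokenization; infer_instance

def pvWitness_top_tokenization : (List (List (String × List String))) :=
  [[("tokens", ["a", "b"])], [("tokens", ["ab"])]]

def Spec_top_tokenization (tokenizations : List (List (String × List String))) (out : Option (List String)) : Prop := out = top_tokenization_alt tokenizations
instance (tokenizations : List (List (String × List String))) (out : Option (List String)) : Decidable (Spec_top_tokenization tokenizations out) := by unfold Spec_top_tokenization; infer_instance

-- ===== CLAIM (what is proved, stated in full; the proofs are below) =====
def Claim_equal_top_tokenization : Prop := ∀ (tokenizations : List (List (String × List String))), Dom_top_tokenization tokenizations → Pre_top_tokenization tokenizations → Spec_top_tokenization tokenizations (top_tokenization tokenizations)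

-- ===== LEMMAS AND PROOFS =====

-- abstraction of A's loop step: only the head of top_toks matters
def pvF (acc : Option (List (String × List String))) (tok : List (String × List String)) :
    Option (List (String × List String)) :=
  if (pvTokens tok).any (fun t => t == "") then acc
  else match acc with
    | none => some tok
    | some h => if (pvTokens tok).length < (pvTokens h).length then some tok else some h

lemma pvAStep_head (s : List (List (String × List String))) (tok : List (String × List String)) :
    (pvAStep s tok).head? = pvF s.head? tok := by
  cases s with
  | nil => simp [pvAStep, pvF]; split_ifs <;> simp
  | cons h t =>
    simp only [pvAStep, pvF, List.headD, List.head?]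
    split_ifs with hg h1 h2 h3 h3 <;> simp_all <;> try omega

lemma pvFoldl_head (l : List (List (String × List String)))
    (s : List (List (String × List String))) :
    (l.foldl pvAStep s).head? = l.foldl pvF s.head? := by
  induction l generalizing s with
  | nil => rfl
  | cons tok rest ih => simp only [List.foldl_cons, ih, pvAStep_head]

-- the coupling invariant between A's abstracted accumulator and B's dict
def pvInv (o : Option (List (String × List String)))
    (d : PySem.Dict Int (List (String × List String))) : Prop :=
  d.keys.Nodup ∧
  match o with
  | none => d.keys = []
  | some h =>
      d.get? ((pvTokens h).length : Int) = some h ∧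
      ((pvTokens h).length : Int) ∈ d.keys ∧
      ∀ k ∈ d.keys, ((pvTokens h).length : Int) ≤ k

lemma pvGap (l : List String) : (l.contains "") = (l.any fun t => t == "") := by
  induction l with
  | nil => rfl
  | cons h t ih => simp only [List.contains_cons, List.any_cons, ih, BEq.comm]

lemma pvInv_step (o : Option (List (String × List String)))
    (d : PySem.Dict Int (List (String × List String)))
    (tok : List (String × List String)) (h : pvInv o d) :
    pvInv (pvF o tok) (pvBStep d tok) := by
  obtain ⟨hnd, hrest⟩ := h
  by_cases hg : (pvTokens tok).any (fun t => t == "") = true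
  · have hgm : "" ∈ pvTokens tok := by rw [← pvGap] at hg; simpa using hg
    have hB : pvBStep d tok = d := by simp [pvBStep, hgm]
    have hF : pvF o tok = o := by simp [pvF, hg]
    rw [hB, hF]; exact ⟨hnd, hrest⟩
  · simp only [Bool.not_eq_true] at hg
    have hgm : "" ∉ pvTokens tok := by rw [← pvGap] at hg; simpa using hg
    cases o with
    | none =>
      have hk : d.keys = [] := hrest
      have hc : d.contains ((pvTokens tok).length : Int) = false := by
        rw [PySem.Dict.contains_eq_decide_mem_keys, hk]; simp
      have hB : pvBStep d tok = d.insert ((pvTokens tok).length : Int) tok := by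
        simp [pvBStep, hgm, hc]
      have hF : pvF none tok = some tok := by simp [pvF, hg]
      have hkeys := PySem.Dict.keys_insert_of_not_contains d tok hc
      rw [hB, hF]
      refine ⟨by rw [hkeys, hk]; simp, ?_, ?_, ?_⟩
      · exact PySem.Dict.get?_insert_self d _ tok
      · rw [hkeys]; simp
      · intro k hkm; rw [hkeys, hk] at hkm; simp at hkm; omega
    | some hd =>
      obtain ⟨hget, hmem, hmin⟩ := hrest
      by_cases hc : d.contains ((pvTokens tok).length : Int) = true
      · have hB : pvBStep d tok = d := by simp [pvBStep, hgm, hc]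
        have hmemk : ((pvTokens tok).length : Int) ∈ d.keys := by
          rw [← PySem.Dict.contains_iff_mem_keys]; exact hc
        have hge := hmin _ hmemk
        have hnlt : ¬ (pvTokens tok).length < (pvTokens hd).length := by
          intro hlt; push_cast at hge; omega
        have hF : pvF (some hd) tok = some hd := by simp [pvF, hg, hnlt]
        rw [hB, hF]; exact ⟨hnd, hget, hmem, hmin⟩
      · simp only [Bool.not_eq_true] at hc
        have hB : pvBStep d tok = d.insert ((pvTokens tok).length : Int) tok := by
          simp [pvBStep, hgm, hc]
        have hnmem : ((pvTokens tok).length : Int) ∉ d.keys := by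
          rw [← PySem.Dict.contains_iff_mem_keys, hc]; simp
        have hkeys := PySem.Dict.keys_insert_of_not_contains d tok hc
        have hnd' : (d.insert ((pvTokens tok).length : Int) tok).keys.Nodup := by
          rw [hkeys]
          simp only [List.nodup_append, List.nodup_cons, List.not_mem_nil, List.nodup_nil]
          exact ⟨hnd, by simp, fun a ha b hb => by
            simp at hb; subst hb; exact fun he => hnmem (he ▸ ha)⟩
        rw [hB]
        by_cases hlt : (pvTokens tok).length < (pvTokens hd).length
        · have hF : pvF (some hd) tok = some tok := by simp [pvF, hg, hlt]
          rw [hF]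
          refine ⟨hnd', PySem.Dict.get?_insert_self d _ tok, by rw [hkeys]; simp, ?_⟩
          intro k hkm
          rw [hkeys] at hkm
          rcases List.mem_append.mp hkm with hkm | hkm
          · have := hmin k hkm; push_cast at this ⊢; omega
          · simp at hkm; omega
        · have hF : pvF (some hd) tok = some hd := by simp [pvF, hg, hlt]
          rw [hF]
          have hne : ((pvTokens hd).length : Int) ≠ ((pvTokens tok).length : Int) := by
            intro he; exact hnmem (he ▸ hmem)
          refine ⟨hnd', by rw [PySem.Dict.get?_insert_of_ne d tok hne]; exact hget,
            by rw [hkeys]; exact List.mem_append.mpr (Or.inl hmem), ?_⟩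
          intro k hkm
          rw [hkeys] at hkm
          rcases List.mem_append.mp hkm with hkm | hkm
          · exact hmin k hkm
          · simp at hkm; subst hkm; omega

lemma pvInv_foldl (l : List (List (String × List String)))
    (o : Option (List (String × List String)))
    (d : PySem.Dict Int (List (String × List String))) (h : pvInv o d) :
    pvInv (l.foldl pvF o) (l.foldl pvBStep d) := by
  induction l generalizing o d with
  | nil => exact h
  | cons tok rest ih => exact ih _ _ (pvInv_step o d tok h)

lemma pvInv_init : pvInv none PySem.Dict.empty := by
  constructor <;> simp [PySem.Dict.keys, PySem.Dict.empty]

-- ===== VERDICT (by name: the statement is the Claim_ definition above) =====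
theorem top_tokenization_spec : Claim_equal_top_tokenization := by
  intro tokenizations _ _
  show top_tokenization tokenizations = top_tokenization_alt tokenizations
  have hinv := pvInv_foldl tokenizations none PySem.Dict.empty pvInv_init
  obtain ⟨hnd, hrest⟩ := hinv
  have hhead := pvFoldl_head tokenizations []
  simp only [List.head?_nil] at hhead
  simp only [top_tokenization, top_tokenization_alt]
  set d := tokenizations.foldl pvBStep PySem.Dict.empty with hdd
  cases ha : List.foldl pvAStep [] tokenizations with
  | nil =>
    rw [ha] at hhead
    rw [← hhead] at hrest
    have hkeys : d.keys = [] := hrest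
    have hsz : d.size = 0 := by
      have hit : d.items = [] := by
        simpa only [PySem.Dict.keys, List.map_eq_nil_iff] using hkeys
      simp [PySem.Dict.size, hit]
    simp [hsz]
  | cons h t =>
    rw [ha] at hhead
    rw [← hhead] at hrest
    obtain ⟨hget, hmem, hmin⟩ := hrest
    have hkne : d.keys ≠ [] := fun he => by simp [he] at hmem
    have hsz : ¬ d.size = 0 := by
      intro hsz
      have hit : d.items = [] := List.length_eq_zero_iff.mp hsz
      exact hkne (by simp [PySem.Dict.keys, hit])
    rw [if_neg hsz]
    cases hm : PySem.List.min? d.keys (fun k => k) with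
    | none =>
      exact absurd ((PySem.List.min?_eq_none_iff d.keys (fun k => k)).mp hm) hkne
    | some m =>
      have hmmem : m ∈ d.keys := PySem.List.min?_mem hm
      have h1 : ((pvTokens h).length : Int) ≤ m := hmin m hmmem
      have h2 : m ≤ ((pvTokens h).length : Int) := PySem.List.min?_isMin hm _ hmem
      have hme : m = ((pvTokens h).length : Int) := le_antisymm h2 h1
      rw [hme] at hm ⊢
      simp [hget]
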